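-- pv_equiv track=rewrite | github.com/HCury/ProgrammingLanguages | secondAssignment.py | base_builder
-- ===== SOURCE A (Python) =====
-- def convert(n3):
--   if n3 == 0:
--     return 0
--   else:
--     return (n3 % 4 + 10 * convert(n3//4))
--
-- def base_builder(n3):
--   qv=convert(n3)
--   Sum=0
--   qval= qv
--   while qval > 0:
--     Sum=Sum + qval % 10
--     qval=qval//10
--   return (Sum,qv)
-- ===== SOURCE B (Python) =====
-- def base_builder(n3):
--     # one fused recursion over the base-4 digits: returns (digit_sum, base4_repr)
--     def go(m):
--         if m == 0:
--             return (0, 0)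
--         r = m % 4
--         s, q = go(m // 4)
--         return (r + s, r + 10 * q)
--     return go(n3)
-- ===== Notes on version B (the rewrite author's own statement) =====
-- stated objective: simpler
-- what changed: One fused recursion computes the base-4 digit sum and the decimal-encoded base-4 representation together, instead of first building the representation and then re-scanning its decimal digits with a while loop.
import Mathlib
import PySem

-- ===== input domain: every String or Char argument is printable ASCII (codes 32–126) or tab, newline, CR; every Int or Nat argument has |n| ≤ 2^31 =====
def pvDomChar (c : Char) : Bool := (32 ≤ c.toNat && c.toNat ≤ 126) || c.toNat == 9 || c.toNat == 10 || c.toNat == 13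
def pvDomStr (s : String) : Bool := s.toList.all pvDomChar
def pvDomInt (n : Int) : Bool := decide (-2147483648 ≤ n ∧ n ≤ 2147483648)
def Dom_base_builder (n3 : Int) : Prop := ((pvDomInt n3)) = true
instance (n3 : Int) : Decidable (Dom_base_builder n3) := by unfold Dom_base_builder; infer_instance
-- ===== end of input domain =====

-- B fuses A's convert + digit-sum while-loop into one recursion returning both values (objective: simpler).


-- ===== PORT A =====
-- convert: recursion on n3; for n3 < 0 Python never terminates (RecursionError),
-- excluded by Pre_; the n3 < 0 branch here only makes the port total.
def convertA (n3 : Int) : Int :=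
  if n3 = 0 then 0
  else if n3 < 0 then 0
  else PySem.Int.mod n3 4 + 10 * convertA (PySem.Int.floordiv n3 4)
termination_by n3.toNat
decreasing_by
  rw [PySem.Int.floordiv_eq_ediv_of_pos (by norm_num)]
  omega

-- the while-loop of base_builder, state (qval, Sum)
def sumLoopA (qval Sum : Int) : Int :=
  if 0 < qval then sumLoopA (PySem.Int.floordiv qval 10) (Sum + PySem.Int.mod qval 10)
  else Sum
termination_by qval.toNat
decreasing_by
  rw [PySem.Int.floordiv_eq_ediv_of_pos (by norm_num)]
  omega

def base_builder (n3 : Int) : Int × Int :=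
  let qv := convertA n3
  (sumLoopA qv 0, qv)

-- ===== PORT B =====
-- fused recursion; m < 0 branch only makes the port total (Python raises there, outside Pre_)
def goB (m : Int) : Int × Int :=
  if m = 0 then (0, 0)
  else if m < 0 then (0, 0)
  else
    let r := PySem.Int.mod m 4
    let p := goB (PySem.Int.floordiv m 4)
    (r + p.1, r + 10 * p.2)
termination_by m.toNat
decreasing_by
  rw [PySem.Int.floordiv_eq_ediv_of_pos (by norm_num)]
  omega

def base_builder_alt (n3 : Int) : Int × Int := goB n3

-- ===== PRECONDITION & SPEC =====
-- Pre_ excludes n3 < 0, on which both Pythons raise RecursionError (convert / go never reach 0).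
def Pre_base_builder (n3 : Int) : Prop := 0 ≤ n3
instance (n3 : Int) : Decidable (Pre_base_builder n3) := by unfold Pre_base_builder; infer_instance
def pvWitness_base_builder : Int := (100)

def Spec_base_builder (n3 : Int) (out : Int × Int) : Prop := out = base_builder_alt n3
instance (n3 : Int) (out : Int × Int) : Decidable (Spec_base_builder n3 out) := by unfold Spec_base_builder; infer_instance

-- ===== CLAIM (what is proved, stated in full; the proofs are below) =====
def Claim_equal_base_builder : Prop := ∀ (n3 : Int), Dom_base_builder n3 → Pre_base_builder n3 → Spec_base_builder n3 (base_builder n3)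

-- ===== LEMMAS AND PROOFS =====

-- accumulator lemma for the while loop
lemma sumLoopA_acc (q S : Int) : sumLoopA q S = S + sumLoopA q 0 := by
  by_cases h : 0 < q
  · have ih := sumLoopA_acc (PySem.Int.floordiv q 10) (S + PySem.Int.mod q 10)
    have ih0 := sumLoopA_acc (PySem.Int.floordiv q 10) (0 + PySem.Int.mod q 10)
    conv_lhs => rw [sumLoopA, if_pos h]
    conv_rhs => rw [sumLoopA, if_pos h]
    rw [ih, ih0]; ring
  · conv_lhs => rw [sumLoopA, if_neg h]
    conv_rhs => rw [sumLoopA, if_neg h]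
    ring
termination_by q.toNat
decreasing_by
  all_goals rw [PySem.Int.floordiv_eq_ediv_of_pos (by norm_num)]; omega

-- peeling one decimal digit off r + 10*q, 0 ≤ r < 10, 0 ≤ q
lemma sumLoopA_digit (r q : Int) (hr0 : 0 ≤ r) (hr : r < 10) (hq : 0 ≤ q) :
    sumLoopA (r + 10 * q) 0 = r + sumLoopA q 0 := by
  by_cases h : 0 < r + 10 * q
  · rw [sumLoopA, if_pos h]
    have hm : PySem.Int.mod (r + 10 * q) 10 = r := by
      rw [PySem.Int.mod_eq_emod_of_pos (by norm_num)]; omega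
    have hd : PySem.Int.floordiv (r + 10 * q) 10 = q := by
      rw [PySem.Int.floordiv_eq_ediv_of_pos (by norm_num)]; omega
    rw [hm, hd, sumLoopA_acc]; ring
  · have hr' : r = 0 := by omega
    have hq' : q = 0 := by omega
    subst hr'; subst hq'
    norm_num

-- main invariant: B's pair is (A's digit sum, A's convert value), plus nonnegativity of the repr
lemma goB_spec (n : Int) (h : 0 ≤ n) :
    (goB n).2 = convertA n ∧ 0 ≤ (goB n).2 ∧ (goB n).1 = sumLoopA (goB n).2 0 := by
  by_cases h0 : n = 0
  · subst h0
    refine ⟨by rw [goB, convertA]; norm_num, by rw [goB]; norm_num, ?_⟩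
    rw [goB]; norm_num
    rw [sumLoopA]; norm_num
  · have hpos : 0 < n := by omega
    have hq : 0 ≤ PySem.Int.floordiv n 4 := by
      rw [PySem.Int.floordiv_eq_ediv_of_pos (by norm_num)]; omega
    have ih := goB_spec (PySem.Int.floordiv n 4) hq
    have hr0 : 0 ≤ PySem.Int.mod n 4 := by
      rw [PySem.Int.mod_eq_emod_of_pos (by norm_num)]; omega
    have hr4 : PySem.Int.mod n 4 < 4 := by
      rw [PySem.Int.mod_eq_emod_of_pos (by norm_num)]; omega
    rw [goB, if_neg h0, if_neg (by omega)]
    rw [convertA, if_neg h0, if_neg (by omega)]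
    simp only
    refine ⟨by rw [ih.1], by have := ih.2.1; positivity, ?_⟩
    rw [sumLoopA_digit _ _ hr0 (by omega) ih.2.1, ih.2.2]
termination_by n.toNat
decreasing_by
  rw [PySem.Int.floordiv_eq_ediv_of_pos (by norm_num)]
  omega

-- ===== VERDICT (by name: the statement is the Claim_ definition above) =====
theorem base_builder_spec : Claim_equal_base_builder := by
  intro n3 _ hpre
  have h := goB_spec n3 hpre
  unfold Spec_base_builder base_builder base_builder_alt
  simp only
  refine Prod.ext ?_ ?_
  · simp only [← h.1, h.2.2]
  · exact h.1.symm
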